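-- pv_equiv track=rewrite | github.com/hieudtrinh/coursera_python | algorithms/delete-columns-to-make-sorted/DeleteColumnsToMakeSorted.py | minDeletionSize2
-- ===== SOURCE A (Python) =====
-- from typing import List
--
-- def minDeletionSize2(A: List[str]) -> int:
--     strings = []
--     for i in range(0,len(A[0])):
--         temp = "".join([item[i] for item in A])
--         if "".join(sorted(temp)) == temp:
--             pass
--         else:
--             strings.append(1)
--     return len(strings)
-- ===== SOURCE B (Python) =====
-- from typing import List
--
-- def minDeletionSize2(A: List[str]) -> int:
--     cols = len(A[0])
--     bad = set()
--     for r in range(len(A) - 1):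
--         for i in range(cols):
--             if A[r][i] > A[r + 1][i]:
--                 bad.add(i)
--     return len(bad)
-- ===== Notes on version B (the rewrite author's own statement) =====
-- stated objective: alternative
-- what changed: Row-major scan over adjacent row pairs accumulating offending column indices in a set, instead of building each column string and comparing it with its sorted copy.
import Mathlib
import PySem

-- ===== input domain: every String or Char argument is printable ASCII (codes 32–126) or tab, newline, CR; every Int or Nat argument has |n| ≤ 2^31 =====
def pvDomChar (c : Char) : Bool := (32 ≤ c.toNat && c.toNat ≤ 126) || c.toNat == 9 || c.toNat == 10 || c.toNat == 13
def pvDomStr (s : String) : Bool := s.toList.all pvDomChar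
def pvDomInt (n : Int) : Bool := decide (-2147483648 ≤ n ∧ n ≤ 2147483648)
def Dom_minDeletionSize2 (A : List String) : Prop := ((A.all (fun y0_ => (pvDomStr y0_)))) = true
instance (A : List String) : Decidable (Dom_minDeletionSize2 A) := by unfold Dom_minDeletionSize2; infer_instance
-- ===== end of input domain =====

-- B re-implements the column count by a row-major scan over adjacent row pairs collecting
-- offending column indices in a set, instead of sorting each column string; return values only.

-- ===== PORT A =====
-- item[i] is ported as pyGetD (in range under Pre_); "".join/equality of ASCII strings is on List Char.
def minDeletionSize2 (A : List String) : Int :=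
  match A with
  | [] => 0          -- len(A[0]) raises IndexError in Python; excluded by Pre_
  | a0 :: _ =>
    let strings : List Int :=
      (PySem.List.pyRange 0 (a0.toList.length : Int)).foldl
        (fun strings i =>
          let temp : List Char := A.map (fun item => PySem.List.pyGetD item.toList i ' ')
          if PySem.List.sorted temp (fun c => c) == temp then strings
          else strings ++ [1])
        []
    (strings.length : Int)

-- ===== PORT B =====
def minDeletionSize2_alt (A : List String) : Int :=
  match A with
  | [] => 0          -- len(A[0]) raises IndexError in Python; excluded by Pre_
  | a0 :: _ =>
    let cols : Int := a0.toList.length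
    let bad : PySem.Set Int :=
      (PySem.List.pyRange 0 ((A.length : Int) - 1)).foldl
        (fun bad r =>
          (PySem.List.pyRange 0 cols).foldl
            (fun bad i =>
              if PySem.List.pyGetD (PySem.List.pyGetD A r "").toList i ' ' >
                 PySem.List.pyGetD (PySem.List.pyGetD A (r + 1) "").toList i ' '
              then PySem.Set.add bad i else bad)
            bad)
        PySem.Set.empty
    PySem.Set.len bad

-- ===== PRECONDITION & SPEC =====
-- Pre_ excludes exactly the inputs where Python A raises IndexError: the empty list (A[0])
-- and ragged inputs where some row is shorter than the first row (item[i]).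
def Pre_minDeletionSize2 (A : List String) : Prop :=
  A ≠ [] ∧ ∀ s ∈ A, (A.headD "").toList.length ≤ s.toList.length
instance (A : List String) : Decidable (Pre_minDeletionSize2 A) := by
  unfold Pre_minDeletionSize2; infer_instance
def pvWitness_minDeletionSize2 : List String := ["cba", "daf", "ghi"]

def Spec_minDeletionSize2 (A : List String) (out : Int) : Prop := out = minDeletionSize2_alt A
instance (A : List String) (out : Int) : Decidable (Spec_minDeletionSize2 A out) := by
  unfold Spec_minDeletionSize2; infer_instance

-- ===== CLAIM (what is proved, stated in full; the proofs are below) =====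
def Claim_equal_minDeletionSize2 : Prop :=
  ∀ (A : List String), Dom_minDeletionSize2 A → Pre_minDeletionSize2 A →
    Spec_minDeletionSize2 A (minDeletionSize2 A)

-- ===== LEMMAS AND PROOFS =====

-- the 'if cond: pass else: append(1)' loop of A collects the filter of the non-satisfying elements
theorem pv_foldl_skip_append {α β : Type} (p : α → Bool) (f : α → β) (l : List α)
    (acc : List β) :
    l.foldl (fun acc x => if p x then acc else acc ++ [f x]) acc
      = acc ++ (l.filter (fun x => !p x)).map f := by
  induction l generalizing acc with
  | nil => simp
  | cons a t ih => cases hp : p a <;> simp [hp, ih]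

-- membership after the inner 'for i: if …: bad.add(i)' loop
theorem pv_mem_inner (P : Int → Prop) [DecidablePred P] (l : List Int) (s : PySem.Set Int)
    (x : Int) :
    x ∈ l.foldl (fun s i => if P i then PySem.Set.add s i else s) s
      ↔ x ∈ s ∨ (x ∈ l ∧ P x) := by
  induction l generalizing s with
  | nil => simp
  | cons a t ih =>
    simp only [List.foldl_cons]
    by_cases hp : P a
    · rw [if_pos hp, ih]
      simp only [PySem.Set.mem_add, List.mem_cons]
      constructor
      · rintro (⟨h | rfl⟩ | ⟨h1, h2⟩) <;> tauto
      · rintro (h | ⟨rfl | h1, h2⟩) <;> tauto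
    · rw [if_neg hp, ih]
      constructor
      · rintro (h | ⟨h1, h2⟩) <;> simp_all
      · rintro (h | ⟨h1, h2⟩)
        · tauto
        · rcases List.mem_cons.1 h1 with rfl | h1 <;> tauto

theorem pv_nodup_inner (P : Int → Prop) [DecidablePred P] (l : List Int) (s : PySem.Set Int)
    (hs : s.Nodup) :
    (l.foldl (fun s i => if P i then PySem.Set.add s i else s) s).Nodup := by
  induction l generalizing s with
  | nil => exact hs
  | cons a t ih =>
    simp only [List.foldl_cons]
    by_cases hp : P a
    · rw [if_pos hp]; exact ih _ (PySem.Set.nodup_add _ _ hs)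
    · rw [if_neg hp]; exact ih _ hs

-- membership after the whole nested loop of B
theorem pv_mem_outer (Q : Int → Int → Prop) [∀ r i, Decidable (Q r i)] (inner : List Int)
    (rows : List Int) (s : PySem.Set Int) (x : Int) :
    x ∈ rows.foldl
        (fun s r => inner.foldl (fun s i => if Q r i then PySem.Set.add s i else s) s) s
      ↔ x ∈ s ∨ (x ∈ inner ∧ ∃ r ∈ rows, Q r x) := by
  induction rows generalizing s with
  | nil => simp
  | cons a t ih =>
    simp only [List.foldl_cons]
    rw [ih, pv_mem_inner]
    simp only [List.mem_cons]
    constructor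
    · rintro ((h | ⟨h1, h2⟩) | ⟨h1, r, hr, h2⟩) <;> [tauto; exact Or.inr ⟨h1, a, by tauto⟩;
        exact Or.inr ⟨h1, r, by tauto⟩]
    · rintro (h | ⟨h1, r, rfl | hr, h2⟩) <;> tauto

theorem pv_nodup_outer (Q : Int → Int → Prop) [∀ r i, Decidable (Q r i)] (inner : List Int)
    (rows : List Int) (s : PySem.Set Int) (hs : s.Nodup) :
    (rows.foldl
        (fun s r => inner.foldl (fun s i => if Q r i then PySem.Set.add s i else s) s) s).Nodup := by
  induction rows generalizing s with
  | nil => exact hs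
  | cons a t ih => exact ih _ (pv_nodup_inner _ _ _ hs)

-- B's cell access A[r][i] equals the r-th entry of A's column list
theorem pv_cell_eq (L : List String) (i : Int) (k : Nat) (hk : k < L.length) :
    PySem.List.pyGetD (PySem.List.pyGetD L (k : Int) "").toList i ' '
      = (L.map (fun item => PySem.List.pyGetD item.toList i ' '))[k]'(by simpa) := by
  rw [PySem.List.pyGetD_eq_getElem L "" (by positivity) (by exact_mod_cast hk)]
  simp

-- a column is out of order iff some adjacent pair of rows witnesses it
theorem pv_unsorted_iff (L : List String) (i : Int) :
    (¬ PySem.List.sorted (L.map fun item => PySem.List.pyGetD item.toList i ' ') (fun c => c)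
        = (L.map fun item => PySem.List.pyGetD item.toList i ' '))
      ↔ ∃ r : Int, r ∈ PySem.List.pyRange 0 ((L.length : Int) - 1) ∧
          PySem.List.pyGetD (PySem.List.pyGetD L r "").toList i ' ' >
            PySem.List.pyGetD (PySem.List.pyGetD L (r + 1) "").toList i ' ' := by
  set temp := L.map fun item => PySem.List.pyGetD item.toList i ' ' with htemp
  have hlen : temp.length = L.length := by simp [htemp]
  have hpair : PySem.List.sorted temp (fun c => c) = temp ↔
      temp.Pairwise (fun a b : Char => a ≤ b) := by
    constructor
    · intro h
      have := PySem.List.sorted_pairwise temp (fun c => c)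
      rwa [h] at this
    · intro h
      exact PySem.List.sorted_eq_self_of_pairwise temp _ h
  have hchain : temp.Pairwise (fun a b : Char => a ≤ b) ↔
      ∀ (k : Nat) (hk1 : k + 1 < temp.length), temp[k]'(by omega) ≤ temp[k+1]'hk1 := by
    rw [← List.isChain_iff_pairwise, List.isChain_iff_getElem]
  constructor
  · intro h
    rw [hpair, hchain] at h
    push Not at h
    obtain ⟨k, hk, hlt⟩ := h
    rw [hlen] at hk
    refine ⟨(k : Int), ?_, ?_⟩
    · rw [PySem.List.mem_pyRange_one]
      constructor
      · positivity
      · omega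
    · rw [pv_cell_eq L i k (by omega), show ((k : Int) + 1) = ((k + 1 : Nat) : Int) by push_cast; ring,
        pv_cell_eq L i (k+1) (by omega)]
      exact hlt
  · rintro ⟨r, hr, hgt⟩ h
    rw [hpair, hchain] at h
    rw [PySem.List.mem_pyRange_one] at hr
    obtain ⟨hr0, hr1⟩ := hr
    set k := r.toNat with hkdef
    have hrk : r = (k : Int) := by omega
    have hk : k + 1 < L.length := by omega
    have := h k (by omega)
    rw [hrk, pv_cell_eq L i k (by omega), show ((k : Int) + 1) = ((k + 1 : Nat) : Int) by push_cast; ring,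
      pv_cell_eq L i (k+1) (by omega)] at hgt
    exact absurd this (not_le_of_gt hgt)

-- the two ports agree on every input (B's default-free cells coincide with A's column entries)
theorem pv_ports_eq (A : List String) : minDeletionSize2 A = minDeletionSize2_alt A := by
  cases A with
  | nil => rfl
  | cons a0 rest =>
    set L := a0 :: rest with hL
    show ((((PySem.List.pyRange 0 (a0.toList.length : Int)).foldl
        (fun strings i =>
          if PySem.List.sorted (L.map fun item => PySem.List.pyGetD item.toList i ' ')
              (fun c => c) == (L.map fun item => PySem.List.pyGetD item.toList i ' ')
          then strings else strings ++ [(1 : Int)])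
        []).length : Int))
      = PySem.Set.len
        ((PySem.List.pyRange 0 ((L.length : Int) - 1)).foldl
          (fun bad r =>
            (PySem.List.pyRange 0 (a0.toList.length : Int)).foldl
              (fun bad i =>
                if PySem.List.pyGetD (PySem.List.pyGetD L r "").toList i ' ' >
                   PySem.List.pyGetD (PySem.List.pyGetD L (r + 1) "").toList i ' '
                then PySem.Set.add bad i else bad)
              bad)
          PySem.Set.empty)
    rw [pv_foldl_skip_append]
    set p : Int → Bool := fun i =>
      PySem.List.sorted (L.map fun item => PySem.List.pyGetD item.toList i ' ') (fun c => c)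
        == (L.map fun item => PySem.List.pyGetD item.toList i ' ') with hp
    set bad := (PySem.List.pyRange 0 ((L.length : Int) - 1)).foldl
        (fun bad r =>
          (PySem.List.pyRange 0 (a0.toList.length : Int)).foldl
            (fun bad i =>
              if PySem.List.pyGetD (PySem.List.pyGetD L r "").toList i ' ' >
                 PySem.List.pyGetD (PySem.List.pyGetD L (r + 1) "").toList i ' '
              then PySem.Set.add bad i else bad)
            bad)
        PySem.Set.empty with hbad
    have hndbad : bad.Nodup := by
      rw [hbad]
      exact pv_nodup_outer _ _ _ _ List.nodup_nil
    have hperm : ((PySem.List.pyRange 0 (a0.toList.length : Int)).filter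
        (fun x => !p x)).Perm bad := by
      rw [List.perm_ext_iff_of_nodup
        (List.Nodup.filter _ (PySem.List.nodup_pyRange_one _ _)) hndbad]
      intro x
      rw [List.mem_filter, hbad, pv_mem_outer]
      simp only [show (PySem.Set.empty : PySem.Set Int) = [] from rfl, List.not_mem_nil, false_or]
      constructor
      · rintro ⟨hx, hpx⟩
        refine ⟨hx, ?_⟩
        have : ¬ (p x = true) := by simp_all
        rw [hp] at this
        simp only [beq_iff_eq] at this
        obtain ⟨r, hr, hgt⟩ := (pv_unsorted_iff L x).1 this
        exact ⟨r, hr, hgt⟩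
      · rintro ⟨hx, r, hr, hgt⟩
        refine ⟨hx, ?_⟩
        have : ¬ PySem.List.sorted (L.map fun item => PySem.List.pyGetD item.toList x ' ')
            (fun c => c) = (L.map fun item => PySem.List.pyGetD item.toList x ' ') :=
          (pv_unsorted_iff L x).2 ⟨r, hr, hgt⟩
        simp [hp, this]
    simp only [List.nil_append, List.length_map]
    rw [hperm.length_eq]
    rfl

-- ===== VERDICT (by name: the statement is the Claim_ definition above) =====
theorem minDeletionSize2_spec : Claim_equal_minDeletionSize2 := by
  intro A _ _
  unfold Spec_minDeletionSize2
  exact pv_ports_eq A
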